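-- pv_equiv track=rewrite | github.com/beandrake/AdventOfCode2023 | day_03_B.py | getNumberAt
-- ===== SOURCE A (Python) =====
-- def getNumberAt(index, line):
-- 	"""
-- 	Given the index of a digit and the line of text the digit is from, return the value of the integer containing that digit.
-- 	"""
-- 	if not line[index].isnumeric():
-- 		raise ValueError(f"The character at index {index} is not a digit as expected in the following line:\n{line}")
--
-- 	# Let's find the left-most digit's index
-- 	indexOfLeftMostDigit = index
-- 	while True:
-- 		if indexOfLeftMostDigit-1 < 0   or   not line[indexOfLeftMostDigit-1].isnumeric():
-- 			break
-- 		indexOfLeftMostDigit -= 1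
--
-- 	# Let's find the right-most digit's index
-- 	indexOfRightMostDigit = index
-- 	while True:
-- 		if indexOfRightMostDigit+1 == len(line)   or   not line[indexOfRightMostDigit+1].isnumeric():
-- 			break
-- 		indexOfRightMostDigit += 1
--
-- 	number = line[indexOfLeftMostDigit:indexOfRightMostDigit+1]
-- 	return int(number)
-- ===== SOURCE B (Python) =====
-- def getNumberAt(index, line):
-- 	"""
-- 	Given the index of a digit and the line of text the digit is from, return the value of the integer containing that digit.
-- 	Single left-to-right pass over the line grouping maximal runs of numeric characters; returns the run containing index.
-- 	"""
-- 	if not (0 <= index < len(line)) or not line[index].isnumeric():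
-- 		raise ValueError(f"The character at index {index} is not a digit as expected in the following line:\n{line}")
-- 	start = 0
-- 	for i, ch in enumerate(line):
-- 		if not ch.isnumeric():
-- 			if start <= index < i:
-- 				return int(line[start:i])
-- 			start = i + 1
-- 	return int(line[start:])
-- ===== Notes on version B (the rewrite author's own statement) =====
-- stated objective: alternative
-- what changed: B replaces A's two bidirectional while-loops that grow the number outward from index with a single left-to-right pass that groups maximal runs of numeric characters and returns the run containing index, validating the index bound up front.
-- outside the precondition, e.g. on getNumberAt(-1, '12'): A returns 2, B raises ValueError; on getNumberAt(-2, '123'): A returns 23, B raises ValueError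
import Mathlib
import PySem

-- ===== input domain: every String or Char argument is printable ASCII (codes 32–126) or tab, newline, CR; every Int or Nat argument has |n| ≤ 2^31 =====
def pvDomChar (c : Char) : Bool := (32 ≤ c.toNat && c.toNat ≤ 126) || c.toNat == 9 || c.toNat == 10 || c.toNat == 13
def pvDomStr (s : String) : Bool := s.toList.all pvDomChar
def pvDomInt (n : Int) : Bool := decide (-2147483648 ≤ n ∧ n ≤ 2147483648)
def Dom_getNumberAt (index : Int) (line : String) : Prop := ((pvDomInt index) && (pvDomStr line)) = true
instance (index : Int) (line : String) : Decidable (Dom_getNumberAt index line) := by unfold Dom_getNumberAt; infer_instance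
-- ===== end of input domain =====

-- B replaces A's two while-loops growing outward from index by one left-to-right pass over
-- maximal digit runs (a different decomposition, not claimed faster); equality is proved on
-- Pre_ (non-negative in-range index pointing at a digit). isnumeric is ported as
-- PySem.Chars.isdigit, exact on the ASCII domain Dom_ admits.

-- ===== PORT A =====
-- the `while True: if …: break; indexOfLeftMostDigit -= 1` loop
def pvLeft (cs : List Char) (l : Int) : Int :=
  if l - 1 < 0 then l
  else
    match PySem.List.pyGet? cs (l - 1) with
    | none => l  -- IndexError in Python (unreachable under Pre_)
    | some c => if PySem.Chars.isdigit c = false then l else pvLeft cs (l - 1)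
termination_by l.toNat
decreasing_by omega

-- the `while True: if …: break; indexOfRightMostDigit += 1` loop
def pvRight (cs : List Char) (r : Int) : Int :=
  if r + 1 = (cs.length : Int) then r
  else
    match h2 : PySem.List.pyGet? cs (r + 1) with
    | none => r  -- IndexError in Python (unreachable under Pre_)
    | some c => if PySem.Chars.isdigit c = false then r else pvRight cs (r + 1)
termination_by ((cs.length : Int) - r).toNat
decreasing_by
  have hin : PySem.Raise.InRange cs.length (r + 1) := by
    by_contra hc
    rw [← PySem.List.pyGet?_eq_none_iff] at hc
    simp [hc] at h2
  unfold PySem.Raise.InRange at hin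
  omega

def getNumberAt (index : Int) (line : String) : Int :=
  match PySem.List.pyGet? line.toList index with
  | none => 0  -- IndexError in Python (outside Pre_)
  | some c =>
    if PySem.Chars.isdigit c = false then 0  -- ValueError in Python (outside Pre_)
    else
      (PySem.Int.ofChars? (PySem.List.slice line.toList
        (some (pvLeft line.toList index)) (some (pvRight line.toList index + 1)))).getD 0

-- ===== PORT B =====
-- the `for i, ch in enumerate(line)` pass of Source B: start is the start of the current digit run
def pvRuns (index : Int) (cs : List Char) (start i : Int) (rest : List Char) : Int :=
  match rest with
  | [] => (PySem.Int.ofChars? (PySem.List.slice cs (some start) none)).getD 0  -- int(line[start:])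
  | c :: rest' =>
    if PySem.Chars.isdigit c = false then
      if start ≤ index ∧ index < i then
        (PySem.Int.ofChars? (PySem.List.slice cs (some start) (some i))).getD 0  -- int(line[start:i])
      else pvRuns index cs (i + 1) (i + 1) rest'
    else pvRuns index cs start (i + 1) rest'

def getNumberAt_alt (index : Int) (line : String) : Int :=
  if 0 ≤ index ∧ index < (line.toList.length : Int) ∧
      PySem.Chars.isdigit (PySem.List.pyGetD line.toList index ' ') = true then
    pvRuns index line.toList 0 0 line.toList
  else 0  -- ValueError in Python (outside Pre_)

-- ===== PRECONDITION & SPEC =====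
-- Pre_ excludes (a) out-of-range indices (IndexError in both) and non-digit positions
-- (ValueError in both), and (b) negative in-range indices pointing at a digit: there A's
-- left scan stops at the raw negative index, so A returns an accidental right-suffix of the
-- number (or raises ValueError on an empty slice when the run reaches the end of the line),
-- a negative-index wraparound artefact, while B rejects a negative index and raises ValueError.
def Pre_getNumberAt (index : Int) (line : String) : Prop :=
  0 ≤ index ∧ index < (line.toList.length : Int) ∧
    PySem.Chars.isdigit (PySem.List.pyGetD line.toList index ' ') = true
instance (index : Int) (line : String) : Decidable (Pre_getNumberAt index line) := by
  unfold Pre_getNumberAt; infer_instance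

def pvWitness_getNumberAt : Int × String := (2, "a17b")

def Spec_getNumberAt (index : Int) (line : String) (out : Int) : Prop := out = getNumberAt_alt index line
instance (index : Int) (line : String) (out : Int) : Decidable (Spec_getNumberAt index line out) := by unfold Spec_getNumberAt; infer_instance

-- ===== CLAIM (what is proved, stated in full; the proofs are below) =====
def Claim_equal_getNumberAt : Prop := ∀ (index : Int) (line : String), Dom_getNumberAt index line → Pre_getNumberAt index line → Spec_getNumberAt index line (getNumberAt index line)

-- ===== LEMMAS AND PROOFS =====

-- digit test at a Nat position (default ' ' is not a digit, so out-of-range reads are false)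
def pvDig (cs : List Char) (j : Nat) : Bool := PySem.Chars.isdigit (cs.getD j ' ')

-- [s, e) is the maximal digit run containing position k
def pvRun (cs : List Char) (k s e : Nat) : Prop :=
  s ≤ k ∧ k < e ∧ e ≤ cs.length ∧ (∀ j, s ≤ j → j < e → pvDig cs j = true) ∧
    (s = 0 ∨ pvDig cs (s - 1) = false) ∧ (e = cs.length ∨ pvDig cs e = false)

theorem pvRun_unique {cs : List Char} {k s e s' e' : Nat}
    (h : pvRun cs k s e) (h' : pvRun cs k s' e') : s = s' ∧ e = e' := by
  obtain ⟨hs, hk, he, hd, hb, hbe⟩ := h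
  obtain ⟨hs', hk', he', hd', hb', hbe'⟩ := h'
  constructor
  · rcases Nat.lt_trichotomy s s' with hlt | heq | hgt
    · exfalso
      have hd1 : pvDig cs (s' - 1) = true := hd (s' - 1) (by omega) (by omega)
      rcases hb' with h0 | hf
      · omega
      · rw [hf] at hd1; exact Bool.false_ne_true hd1
    · exact heq
    · exfalso
      have hd1 : pvDig cs (s - 1) = true := hd' (s - 1) (by omega) (by omega)
      rcases hb with h0 | hf
      · omega
      · rw [hf] at hd1; exact Bool.false_ne_true hd1
  · rcases Nat.lt_trichotomy e e' with hlt | heq | hgt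
    · exfalso
      have hd1 : pvDig cs e = true := hd' e (by omega) (by omega)
      rcases hbe with h0 | hf
      · omega
      · rw [hf] at hd1; exact Bool.false_ne_true hd1
    · exact heq
    · exfalso
      have hd1 : pvDig cs e' = true := hd e' (by omega) (by omega)
      rcases hbe' with h0 | hf
      · omega
      · rw [hf] at hd1; exact Bool.false_ne_true hd1

theorem pvDig_of_getElem? {cs : List Char} {j : Nat} {c : Char} (h : cs[j]? = some c) :
    pvDig cs j = PySem.Chars.isdigit c := by
  unfold pvDig
  rw [List.getD_eq_getElem?_getD, h]
  rfl

theorem pvDig_of_ge {cs : List Char} {j : Nat} (h : cs.length ≤ j) : pvDig cs j = false := by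
  unfold pvDig
  rw [List.getD_eq_getElem?_getD, List.getElem?_eq_none (by omega)]
  rfl

theorem pvLeft_spec (cs : List Char) (k : Nat) :
    ∃ l : Nat, pvLeft cs (k : Int) = (l : Int) ∧ l ≤ k ∧
      (∀ j, l ≤ j → j < k → pvDig cs j = true) ∧ (l = 0 ∨ pvDig cs (l - 1) = false) := by
  induction k with
  | zero =>
    refine ⟨0, ?_, le_refl _, by omega, Or.inl rfl⟩
    unfold pvLeft
    norm_num
  | succ k ih =>
    have hstep : ((k + 1 : Nat) : Int) - 1 = (k : Int) := by push_cast; ring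
    have hneg : ¬ (((k + 1 : Nat) : Int) - 1 < 0) := by push_cast; omega
    cases hg : cs[k]? with
    | none =>
      have hlen : cs.length ≤ k := List.getElem?_eq_none_iff.mp hg
      have hunf : pvLeft cs ((k + 1 : Nat) : Int) = ((k + 1 : Nat) : Int) := by
        conv_lhs => rw [pvLeft]
        rw [if_neg hneg, hstep, PySem.List.pyGet?_natCast, hg]
      refine ⟨k + 1, hunf, le_refl _, fun j h1 h2 => by omega, Or.inr ?_⟩
      simpa using pvDig_of_ge (cs := cs) (j := k + 1 - 1) (by omega)
    | some c =>
      have hunf : pvLeft cs ((k + 1 : Nat) : Int) =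
          (if PySem.Chars.isdigit c = false then ((k + 1 : Nat) : Int) else pvLeft cs (k : Int)) := by
        conv_lhs => rw [pvLeft]
        rw [if_neg hneg, hstep, PySem.List.pyGet?_natCast, hg]
      have hdigc : pvDig cs k = PySem.Chars.isdigit c := pvDig_of_getElem? hg
      by_cases hd : PySem.Chars.isdigit c = false
      · rw [if_pos hd] at hunf
        refine ⟨k + 1, hunf, le_refl _, fun j h1 h2 => by omega, Or.inr ?_⟩
        simpa using hdigc.trans hd
      · rw [if_neg hd] at hunf
        obtain ⟨l, hval, hle, hdig, hb⟩ := ih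
        refine ⟨l, hunf.trans hval, by omega, ?_, hb⟩
        intro j hj1 hj2
        rcases Nat.lt_or_ge j k with h | h
        · exact hdig j hj1 h
        · have : j = k := by omega
          subst this
          rw [hdigc]
          simpa using hd

theorem pvRight_spec_aux (m : Nat) : ∀ (cs : List Char) (k : Nat), cs.length - k = m → k < cs.length →
    ∃ r : Nat, pvRight cs (k : Int) = (r : Int) ∧ k ≤ r ∧ r < cs.length ∧
      (∀ j, k < j → j ≤ r → pvDig cs j = true) ∧
      (r + 1 = cs.length ∨ pvDig cs (r + 1) = false) := by
  induction m with
  | zero => intro cs k hm hk; omega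
  | succ m ih =>
    intro cs k hm hk
    by_cases hend : (k : Int) + 1 = (cs.length : Int)
    · refine ⟨k, ?_, le_refl _, hk, fun j h1 h2 => by omega, Or.inl (by exact_mod_cast hend)⟩
      conv_lhs => rw [pvRight]
      rw [if_pos hend]
    · have hlt : k + 1 < cs.length := by omega
      have hg : PySem.List.pyGet? cs ((k : Int) + 1) = some cs[k + 1] := by
        rw [show (k : Int) + 1 = ((k + 1 : Nat) : Int) by push_cast; ring,
          PySem.List.pyGet?_natCast, List.getElem?_eq_getElem hlt]
      have hdig1 : pvDig cs (k + 1) = PySem.Chars.isdigit cs[k + 1] :=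
        pvDig_of_getElem? (List.getElem?_eq_getElem hlt)
      have hunf : pvRight cs (k : Int) =
          (if PySem.Chars.isdigit cs[k + 1] = false then (k : Int)
           else pvRight cs ((k : Int) + 1)) := by
        conv_lhs => rw [pvRight]
        rw [if_neg hend]
        split
        · next h2 => rw [hg] at h2; simp at h2
        · next c h2 =>
            rw [hg] at h2
            rw [Option.some_inj.mp h2]
      by_cases hd : PySem.Chars.isdigit cs[k + 1] = false
      · rw [if_pos hd] at hunf
        exact ⟨k, hunf, le_refl _, hk, fun j h1 h2 => by omega, Or.inr (hdig1.trans hd)⟩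
      · rw [if_neg hd] at hunf
        obtain ⟨r, hval, hle, hr, hdig, hb⟩ := ih cs (k + 1) (by omega) hlt
        refine ⟨r, ?_, by omega, hr, ?_, hb⟩
        · rw [hunf, show (k : Int) + 1 = ((k + 1 : Nat) : Int) by push_cast; ring]
          exact hval
        · intro j hj1 hj2
          rcases Nat.lt_or_ge (k + 1) j with h | h
          · exact hdig j h hj2
          · have : j = k + 1 := by omega
            subst this
            rw [hdig1]
            simpa using hd

theorem pvRuns_spec (k : Nat) (cs : List Char) (hk : k < cs.length) (hdk : pvDig cs k = true) :
    ∀ (rest : List Char) (s i : Nat), rest = cs.drop i → s ≤ i →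
    (s = 0 ∨ pvDig cs (s - 1) = false) →
    (∀ j, s ≤ j → j < i → pvDig cs j = true) →
    (k < i → s ≤ k) →
    ∃ s' e' : Nat, pvRun cs k s' e' ∧
      pvRuns (k : Int) cs (s : Int) (i : Int) rest =
        (PySem.Int.ofChars? (PySem.List.slice cs (some (s' : Int)) (some (e' : Int)))).getD 0 := by
  intro rest
  induction rest with
  | nil =>
    intro s i hrest hsi hb hdig hki
    have hilen : cs.length ≤ i := by
      by_contra hc
      have hne : cs.drop i ≠ [] := by rw [ne_eq, List.drop_eq_nil_iff]; omega
      exact hne hrest.symm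
    refine ⟨s, cs.length, ⟨hki (by omega), hk, le_refl _, fun j h1 h2 => hdig j h1 (by omega), hb, Or.inl rfl⟩, ?_⟩
    unfold pvRuns
    rw [PySem.List.slice_from_natCast, PySem.List.slice_natCast,
      List.take_of_length_le (by simp)]
  | cons c rest' ih =>
    intro s i hrest hsi hb hdig hki
    have hilen : i < cs.length := by
      by_contra hc
      rw [List.drop_eq_nil_iff.mpr (by omega)] at hrest
      simp at hrest
    have hcons : cs[i] :: cs.drop (i + 1) = cs.drop i := List.getElem_cons_drop ..
    rw [← hrest] at hcons
    have hc : c = cs[i] := (List.cons.injEq ..).mp hcons.symm |>.1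
    have hrest' : rest' = cs.drop (i + 1) := (List.cons.injEq ..).mp hcons.symm |>.2
    have hdigi : pvDig cs i = PySem.Chars.isdigit c := by
      rw [hc]; exact pvDig_of_getElem? (List.getElem?_eq_getElem hilen)
    unfold pvRuns
    by_cases hd : PySem.Chars.isdigit c = false
    · by_cases hin : (s : Int) ≤ (k : Int) ∧ (k : Int) < (i : Int)
      · refine ⟨s, i, ⟨by exact_mod_cast hin.1, by exact_mod_cast hin.2, by omega, hdig, hb, Or.inr (hdigi.trans hd)⟩, ?_⟩
        simp [hd, hin]
      · have hknotin : ¬ (s ≤ k ∧ k < i) := by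
          intro hcon; exact hin ⟨by exact_mod_cast hcon.1, by exact_mod_cast hcon.2⟩
        have hki' : i + 1 ≤ k := by
          rcases Nat.lt_or_ge k (i + 1) with h | h
          · exfalso
            rcases Nat.lt_or_ge k i with h2 | h2
            · exact hknotin ⟨hki h2, h2⟩
            · have : k = i := by omega
              rw [this, hdigi, hd] at hdk
              exact Bool.false_ne_true hdk
          · exact h
        obtain ⟨s', e', hrun, hval⟩ := ih (i + 1) (i + 1) hrest' (le_refl _)
          (Or.inr (by simpa using hdigi.trans hd)) (fun j h1 h2 => by omega) (by omega)
        refine ⟨s', e', hrun, ?_⟩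
        simp only [hd, if_neg hin]
        rw [show (i : Int) + 1 = ((i + 1 : Nat) : Int) by push_cast; ring]
        exact hval
    · obtain ⟨s', e', hrun, hval⟩ := ih s (i + 1) hrest' (by omega) hb
        (fun j h1 h2 => by
          rcases Nat.lt_or_ge j i with h | h
          · exact hdig j h1 h
          · have : j = i := by omega
            subst this
            rw [hdigi]; simpa using hd)
        (fun h => by
          rcases Nat.lt_or_ge k i with h2 | h2
          · exact hki h2
          · have : k = i := by omega
            omega)
      refine ⟨s', e', hrun, ?_⟩
      simp only [hd]
      rw [show (i : Int) + 1 = ((i + 1 : Nat) : Int) by push_cast; ring]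
      exact hval

-- ===== VERDICT (by name: the statement is the Claim_ definition above) =====
theorem getNumberAt_spec : Claim_equal_getNumberAt := by
  intro index line _hdom hpre
  obtain ⟨h0, hlen, hdig⟩ := hpre
  unfold Spec_getNumberAt
  obtain ⟨k, hk⟩ : ∃ k : Nat, index = (k : Int) := ⟨index.toNat, (Int.toNat_of_nonneg h0).symm⟩
  subst hk
  have hklen : k < line.toList.length := by exact_mod_cast hlen
  have hdigk : pvDig line.toList k = true := by
    unfold pvDig
    rw [← PySem.List.pyGetD_natCast]
    exact hdig
  have hgetk : line.toList[k]? = some line.toList[k] := List.getElem?_eq_getElem hklen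
  have hdigc : PySem.Chars.isdigit line.toList[k] = true := by
    rw [← pvDig_of_getElem? hgetk]; exact hdigk
  -- B computes the int of some maximal run [s', e') containing k
  have hB : getNumberAt_alt (k : Int) line = pvRuns (k : Int) line.toList 0 0 line.toList := by
    unfold getNumberAt_alt
    rw [if_pos ⟨by omega, by exact_mod_cast hklen, hdig⟩]
  obtain ⟨s', e', hrunB, hvalB⟩ := pvRuns_spec k line.toList hklen hdigk line.toList 0 0
    (by simp) (le_refl _) (Or.inl rfl) (fun j h1 h2 => by omega) (fun _ => Nat.zero_le _)
  -- A computes the int of the run [l, r+1] found by its two scans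
  obtain ⟨l, hlval, hlle, hldig, hlb⟩ := pvLeft_spec line.toList k
  obtain ⟨r, hrval, hrle, hrlt, hrdig, hrb⟩ :=
    pvRight_spec_aux (line.toList.length - k) line.toList k rfl hklen
  have hrunA : pvRun line.toList k l (r + 1) := by
    refine ⟨hlle, by omega, by omega, ?_, hlb, ?_⟩
    · intro j h1 h2
      rcases Nat.lt_trichotomy j k with h | h | h
      · exact hldig j h1 h
      · subst h; exact hdigk
      · exact hrdig j h (by omega)
    · rcases hrb with h | h
      · exact Or.inl h
      · exact Or.inr h
  obtain ⟨hseq, heeq⟩ := pvRun_unique hrunA hrunB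
  have hA : getNumberAt (k : Int) line =
      (PySem.Int.ofChars? (PySem.List.slice line.toList
        (some ((l : Nat) : Int)) (some (((r + 1 : Nat)) : Int)))).getD 0 := by
    unfold getNumberAt
    rw [show PySem.List.pyGet? line.toList (k : Int) = some line.toList[k] from by
      rw [PySem.List.pyGet?_natCast]; exact hgetk]
    simp only [hdigc, hlval, hrval]
    norm_num
  norm_num at hvalB
  rw [hA, hB, hvalB, ← hseq, ← heeq]
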